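-- pv_equiv track=rewrite | github.com/Sveta151/censor_dispenser | censor_dispenser.py | censoring_three
-- ===== SOURCE A (Python) =====
-- def work_with_text(text):
--     new_text = text.lower()
--     new_text = new_text.split()
--     new_text_two = []
--     for i in new_text:
--         new_i = i.strip(',.!()\"')
--         new_text_two.append(new_i)
--     return new_text_two
--
-- def censoring_two(text, terms):
--     new_text = text
--     for i in terms:
--         new_text = new_text.replace(i, "&&&")
--     return new_text
--
-- def censoring_three(text, terms, words):
--     new_text = censoring_two(text, terms)
--     count = 0
--     yes = 0
--     new_text_two = work_with_text(new_text)
--     new_text_three = []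
--     for word in new_text_two:
--         for i in words:
--             yes = 0
--             if (i == word):
--                 count += 1
--                 if (count > 2):
--                     yes += 1
--                     new_text_three.append("%%%")
--                     break
--
--         if (yes == 0):
--             new_text_three.append(word)
--     # result = " ".join(new_text_three)
--     return new_text_three
-- ===== SOURCE B (Python) =====
-- def work_with_text(text):
--     new_text = text.lower()
--     new_text = new_text.split()
--     new_text_two = []
--     for i in new_text:
--         new_i = i.strip(',.!()\"')
--         new_text_two.append(new_i)
--     return new_text_two
--
-- def censoring_two(text, terms):
--     new_text = text
--     for i in terms:
--         new_text = new_text.replace(i, "&&&")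
--     return new_text
--
-- def censoring_three(text, terms, words):
--     tokens = work_with_text(censoring_two(text, terms))
--     counts = [words.count(tok) for tok in tokens]
--     cumulative = []
--     total = 0
--     for n in counts:
--         total += n
--         cumulative.append(total)
--     return ["%%%" if n and c > 2 else tok
--             for tok, n, c in zip(tokens, counts, cumulative)]
-- ===== Notes on version B (the rewrite author's own statement) =====
-- stated objective: alternative
-- what changed: A's single fused loop with a running break-on-threshold counter is replaced by three separate passes: a per-token count table via words.count, an explicit prefix-sum pass, and a zip/comprehension mapping each token to '%%%' when it matches and its cumulative count exceeds 2.
import Mathlib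
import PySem

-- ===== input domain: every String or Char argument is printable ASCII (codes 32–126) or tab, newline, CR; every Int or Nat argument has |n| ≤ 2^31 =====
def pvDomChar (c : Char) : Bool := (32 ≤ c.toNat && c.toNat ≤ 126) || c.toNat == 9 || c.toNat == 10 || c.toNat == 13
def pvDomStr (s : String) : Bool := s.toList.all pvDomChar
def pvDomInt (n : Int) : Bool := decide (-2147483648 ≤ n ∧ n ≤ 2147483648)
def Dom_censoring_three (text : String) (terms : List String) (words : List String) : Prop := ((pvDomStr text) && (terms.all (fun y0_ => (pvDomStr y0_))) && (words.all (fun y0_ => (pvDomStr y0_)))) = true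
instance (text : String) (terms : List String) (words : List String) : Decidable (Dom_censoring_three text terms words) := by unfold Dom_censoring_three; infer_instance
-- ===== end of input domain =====

-- B replaces A's fused running-counter loop by three passes (count table, prefix sums, mapping); alternative decomposition, same cost.


-- ===== PORT A =====
-- shared module helpers (identical in Source A and Source B)
def work_with_text (text : String) : List String :=
  let new_text := PySem.Str.lower text
  let new_text := PySem.Str.split₀ new_text
  new_text.foldl (fun acc i => acc ++ [PySem.Str.stripChars i ",.!()\""]) []

def censoring_two (text : String) (terms : List String) : String :=
  terms.foldl (fun new_text i => PySem.Str.replace new_text i "&&&") text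

-- A's inner `for i in words` loop: returns (count, yes-as-Bool); break = returning true
def censoringInner (word : String) (count : Int) : List String → Int × Bool
  | [] => (count, false)
  | i :: rest =>
    if i == word then
      if count + 1 > 2 then (count + 1, true)
      else censoringInner word (count + 1) rest
    else censoringInner word count rest

def censoring_three (text : String) (terms : List String) (words : List String) : List String :=
  let new_text := censoring_two text terms
  let new_text_two := work_with_text new_text
  (new_text_two.foldl (fun (st : Int × List String) word =>
      let r := censoringInner word st.1 words
      if r.2 then (r.1, st.2 ++ ["%%%"]) else (r.1, st.2 ++ [word])) (0, [])).2

-- ===== PORT B =====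
def censoring_three_alt (text : String) (terms : List String) (words : List String) : List String :=
  let tokens := work_with_text (censoring_two text terms)
  let counts : List Int := tokens.map (fun tok => (PySem.List.count words tok : Int))
  let cumulative := (counts.foldl (fun (st : Int × List Int) n => (st.1 + n, st.2 ++ [st.1 + n])) (0, [])).2
  (tokens.zip (counts.zip cumulative)).map (fun p => if p.2.1 ≠ 0 ∧ p.2.2 > 2 then "%%%" else p.1)

-- ===== PRECONDITION & SPEC =====
def Spec_censoring_three (text : String) (terms : List String) (words : List String) (out : List String) : Prop := out = censoring_three_alt text terms words
instance (text : String) (terms : List String) (words : List String) (out : List String) : Decidable (Spec_censoring_three text terms words out) := by unfold Spec_censoring_three; infer_instance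

-- ===== CLAIM (what is proved, stated in full; the proofs are below) =====
def Claim_equal_censoring_three : Prop := ∀ (text : String) (terms : List String) (words : List String), Dom_censoring_three text terms words → Spec_censoring_three text terms words (censoring_three text terms words)

-- ===== LEMMAS AND PROOFS =====

-- reference output: token-by-token with running prefix sum S
def cenRef (words : List String) : List String → Int → List String
  | [], _ => []
  | t :: ts, S =>
      (if (words.count t : Int) ≠ 0 ∧ 2 < S + (words.count t : Int) then "%%%" else t)
        :: cenRef words ts (S + (words.count t : Int))

-- prefix sums, head-first
def cenCums : List Int → Int → List Int
  | [], _ => []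
  | n :: ns, t => (t + n) :: cenCums ns (t + n)

theorem censoringInner_spec (word : String) : ∀ (ws : List String) (count : Int),
    censoringInner word count ws =
      if (ws.count word : Int) ≠ 0 ∧ 2 < count + (ws.count word : Int)
      then (max (count + 1) 3, true)
      else (count + (ws.count word : Int), false) := by
  intro ws
  induction ws with
  | nil => intro count; simp [censoringInner]
  | cons i rest ih =>
    intro count
    by_cases h : i == word
    · have hc : (i :: rest).count word = rest.count word + 1 := by
        simp [List.count_cons, h]
      by_cases h2 : count + 1 > 2
      · simp only [censoringInner, h, if_pos h2, hc]
        push_cast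
        have hcond : ((rest.count word : Int) + 1 ≠ 0 ∧ 2 < count + ((rest.count word : Int) + 1)) := by
          constructor <;> omega
        rw [if_pos hcond]
        have hm : max (count + 1) 3 = count + 1 := by omega
        rw [hm]
      · have hle : count + 1 ≤ 2 := by omega
        simp only [censoringInner, h, if_neg h2]
        rw [ih (count + 1), hc]
        push_cast
        by_cases h3 : (rest.count word : Int) ≠ 0 ∧ 2 < count + 1 + (rest.count word : Int)
        · rw [if_pos h3]
          have hcond : ((rest.count word : Int) + 1 ≠ 0 ∧ 2 < count + ((rest.count word : Int) + 1)) := by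
            have := h3.2; constructor <;> omega
          rw [if_pos hcond]
          have e1 : max (count + 1 + 1) 3 = 3 := by omega
          have e2 : max (count + 1) 3 = 3 := by omega
          rw [e1, e2]
        · rw [if_neg h3]
          rw [not_and_or] at h3
          by_cases hk : (rest.count word : Int) = 0
          · have hcond : ¬ ((rest.count word : Int) + 1 ≠ 0 ∧ 2 < count + ((rest.count word : Int) + 1)) := by
              rw [hk]; rintro ⟨-, hlt⟩; omega
            rw [if_neg hcond, hk]; ring_nf
          · have hlt : ¬ 2 < count + 1 + (rest.count word : Int) := by tauto
            have hcond : ¬ ((rest.count word : Int) + 1 ≠ 0 ∧ 2 < count + ((rest.count word : Int) + 1)) := by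
              rintro ⟨-, h'⟩; omega
            rw [if_neg hcond]; ring_nf
    · have hc : (i :: rest).count word = rest.count word := by
        simp [List.count_cons, h]
      simp only [censoringInner, h, Bool.false_eq_true, if_false, ih count, hc]

theorem censoringOuter_spec (words : List String) : ∀ (ts : List String) (count S : Int) (acc : List String),
    (S ≤ 2 → count = S) → (2 < S → 2 < count) →
    (ts.foldl (fun (st : Int × List String) word =>
        let r := censoringInner word st.1 words
        if r.2 then (r.1, st.2 ++ ["%%%"]) else (r.1, st.2 ++ [word])) (count, acc)).2
      = acc ++ cenRef words ts S := by
  intro ts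
  induction ts with
  | nil => intro count S acc _ _; simp [cenRef]
  | cons t rest ih =>
    intro count S acc h1 h2
    rw [List.foldl_cons]
    have hr := censoringInner_spec t words count
    by_cases hc : (words.count t : Int) ≠ 0 ∧ 2 < count + (words.count t : Int)
    · rw [if_pos hc] at hr
      have hcS : (words.count t : Int) ≠ 0 ∧ 2 < S + (words.count t : Int) := by
        refine ⟨hc.1, ?_⟩
        by_cases hS : S ≤ 2
        · have := h1 hS; omega
        · omega
      simp only [hr, if_true]
      rw [ih (max (count + 1) 3) (S + (words.count t : Int)) (acc ++ ["%%%"])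
            (by intro h; omega) (by intro _; omega)]
      rw [cenRef, if_pos hcS, List.append_assoc]
      rfl
    · rw [if_neg hc] at hr
      rw [not_and_or] at hc
      have hcS : ¬ ((words.count t : Int) ≠ 0 ∧ 2 < S + (words.count t : Int)) := by
        rintro ⟨hne, hlt⟩
        have hle : ¬ 2 < count + (words.count t : Int) := by tauto
        by_cases hS : S ≤ 2
        · have := h1 hS; omega
        · have := h2 (by omega); have hk : (0 : Int) ≤ (words.count t : Int) := by positivity
          omega
      have hSk : S + (words.count t : Int) ≤ 2 ∨ (words.count t : Int) = 0 := by
        by_cases hne : (words.count t : Int) = 0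
        · right; exact hne
        · left
          have hle : ¬ 2 < count + (words.count t : Int) := by tauto
          have hk : (0 : Int) ≤ (words.count t : Int) := by positivity
          by_cases hS : S ≤ 2
          · have := h1 hS; omega
          · exfalso; have := h2 (by omega); omega
      simp only [hr, Bool.false_eq_true, if_false]
      rw [ih (count + (words.count t : Int)) (S + (words.count t : Int)) (acc ++ [t]) ?_ ?_]
      · rw [cenRef, if_neg hcS, List.append_assoc]; rfl
      · intro hS
        rcases hSk with h | h
        · have hS2 : S ≤ 2 := by
            have hk : (0 : Int) ≤ (words.count t : Int) := by positivity
            omega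
          have := h1 hS2; omega
        · have := h1 (by omega); omega
      · intro hS
        rcases hSk with h | h
        · omega
        · have := h2 (by omega); omega

theorem cenCums_foldl : ∀ (ns : List Int) (t : Int) (acc : List Int),
    (ns.foldl (fun (st : Int × List Int) n => (st.1 + n, st.2 ++ [st.1 + n])) (t, acc)).2
      = acc ++ cenCums ns t := by
  intro ns
  induction ns with
  | nil => intro t acc; simp [cenCums]
  | cons n rest ih =>
    intro t acc
    rw [List.foldl_cons, ih, cenCums, List.append_assoc]
    rfl

theorem cenZipMap (words : List String) : ∀ (ts : List String) (S : Int),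
    ((ts.zip (((ts.map (fun tok => (PySem.List.count words tok : Int)))).zip
        (cenCums (ts.map (fun tok => (PySem.List.count words tok : Int))) S))).map
      (fun p => if p.2.1 ≠ 0 ∧ p.2.2 > 2 then "%%%" else p.1))
      = cenRef words ts S := by
  intro ts
  induction ts with
  | nil => intro S; simp [cenRef]
  | cons t rest ih =>
    intro S
    simp only [List.map_cons, cenCums, List.zip_cons_cons, cenRef, PySem.List.count_eq]
    rw [← ih (S + (words.count t : Int))]
    simp [PySem.List.count_eq, and_comm]

-- ===== VERDICT (by name: the statement is the Claim_ definition above) =====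
theorem censoring_three_spec : Claim_equal_censoring_three := by
  intro text terms words _
  unfold Spec_censoring_three censoring_three censoring_three_alt
  simp only [cenCums_foldl]
  rw [censoringOuter_spec words (work_with_text (censoring_two text terms)) 0 0 []
        (by intro _; rfl) (by intro h; exact absurd h (by omega))]
  simp only [List.nil_append]
  rw [cenZipMap]
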